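-- pv_equiv track=rewrite | github.com/paulklemstine/factor | v19_compression_iterate.py | farey_rank
-- ===== SOURCE A (Python) =====
-- import math, random, struct, time, gc, os, sys, zlib, signal, heapq, traceback
--
-- def farey_rank(p, q, N):
--     """Compute rank of p/q in Farey sequence F_N.
--     Uses the recursive formula. For small N only."""
--     if q > N:
--         return -1
--     # Count fractions in F_N <= p/q
--     count = 0
--     for d in range(1, N + 1):
--         # Number of fractions with denominator d that are <= p/q
--         count += min(d, (p * d) // q)
--         # Subtract non-coprime ones (Mobius-style approximation)
--     # Exact: sum_{d=1}^{N} floor(p*d/q) but only coprime numerators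
--     # Use simplified: just count coprime pairs
--     count = 0
--     for d in range(1, N + 1):
--         for n in range(0, d + 1):
--             if math.gcd(n, d) == 1 and n * q <= p * d:
--                 count += 1
--     return count
-- ===== SOURCE B (Python) =====
-- def farey_rank(p, q, N):
--     """Rank of p/q in the Farey sequence F_N, by a divisor sieve:
--     for each denominator d count every numerator n in 1..d with n/d <= p/q
--     in closed form, then subtract each denominator's count from all of its
--     multiples, leaving only the coprime numerators."""
--     if q > N:
--         return -1
--     cnt = [0] * (N + 1)
--     for d in range(1, N + 1):
--         cnt[d] = min(d, max(0, p * d // q))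
--     for d in range(1, N + 1):
--         for m in range(2 * d, N + 1, d):
--             cnt[m] -= cnt[d]
--     # the fraction 0/1 itself lies at or below p/q exactly when p/q >= 0
--     return (1 if p >= 0 else 0) + sum(cnt)
-- ===== Notes on version B (the rewrite author's own statement) =====
-- stated objective: alternative
-- what changed: Replaces A's double loop (gcd test on every numerator/denominator pair) by the divisor sieve: a closed-form count per denominator, then subtraction of each denominator's count from its multiples; Pre_ restricts to the natural domain of positive denominators (plus the trivially rejected q > N), excluding q = 0 (A raises ZeroDivisionError for N >= 1) and q < 0 <= N, which is outside the natural domain: no Farey rank is defined for a negative denominator.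
-- outside the precondition, e.g. on farey_rank(1, -2, 3): A returns 5, B returns 1
import Mathlib
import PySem

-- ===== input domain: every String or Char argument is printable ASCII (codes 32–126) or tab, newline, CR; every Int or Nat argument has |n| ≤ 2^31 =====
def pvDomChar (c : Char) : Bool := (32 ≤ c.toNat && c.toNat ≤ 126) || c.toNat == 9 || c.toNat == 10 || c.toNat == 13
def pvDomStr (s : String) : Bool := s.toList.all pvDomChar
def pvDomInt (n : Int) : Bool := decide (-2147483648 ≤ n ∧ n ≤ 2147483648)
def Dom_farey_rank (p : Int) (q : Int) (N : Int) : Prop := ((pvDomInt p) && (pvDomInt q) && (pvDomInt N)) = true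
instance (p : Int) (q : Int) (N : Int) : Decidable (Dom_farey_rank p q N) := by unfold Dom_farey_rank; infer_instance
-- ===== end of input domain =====

-- B replaces A's coprimality double loop by the divisor sieve for the Farey rank
-- (closed-form count per denominator, then subtraction over multiples): a different algorithm.

-- ===== PORT A =====
-- literal transliteration of A: the Python's first loop only writes a variable the
-- second loop overwrites (it matters only because it divides by q, excluded by Pre_)
def farey_rank (p : Int) (q : Int) (N : Int) : Int :=
  if q > N then -1
  else
    let _count : Int := (PySem.List.pyRange 1 (N+1) 1).foldl
      (fun c d => c + min d (PySem.Int.floordiv (p*d) q)) 0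
    let count : Int := (PySem.List.pyRange 1 (N+1) 1).foldl
      (fun c d => (PySem.List.pyRange 0 (d+1) 1).foldl
        (fun c n => if Int.gcd n d = 1 ∧ n * q ≤ p * d then c + 1 else c) c) 0
    count

-- ===== PORT B =====
-- Source B's per-denominator closed form: min(d, max(0, p*d // q))
def pvClosedCount (p : Int) (q : Int) (d : Int) : Int :=
  min d (max 0 (PySem.Int.floordiv (p*d) q))

def farey_rank_alt (p : Int) (q : Int) (N : Int) : Int :=
  if q > N then -1
  else
    let M := N.toNat
    let cnt : List Int := (List.range' 1 M).foldl
      (fun (a : List Int) d => a.set d (pvClosedCount p q (d : Int)))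
      (List.replicate ((N+1).toNat) 0)
    let cnt : List Int := (List.range' 1 M).foldl
      (fun (a : List Int) d =>
        (List.range' (2*d) (M / d - 1) d).foldl
          (fun (a : List Int) m => a.set m (a.getD m 0 - a.getD d 0)) a)
      cnt
    (if p ≥ 0 then 1 else 0) + cnt.sum

-- ===== PRECONDITION & SPEC =====
-- Natural-domain restriction: a Farey-sequence denominator is positive, so Pre_ admits
-- every q ≥ 1 together with the trivially rejected case q > N (A returns -1 there for
-- any q); it excludes q = 0 with N ≥ 1, where A raises ZeroDivisionError, and q < 0
-- with q ≤ N, which lies outside the natural domain (no Farey rank is defined there).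
def Pre_farey_rank (p : Int) (q : Int) (N : Int) : Prop := 1 ≤ q ∨ N < q
instance (p : Int) (q : Int) (N : Int) : Decidable (Pre_farey_rank p q N) := by
  unfold Pre_farey_rank; infer_instance
def pvWitness_farey_rank : Int × Int × Int := (3, 2, 4)

def Spec_farey_rank (p : Int) (q : Int) (N : Int) (out : Int) : Prop := out = farey_rank_alt p q N
instance (p : Int) (q : Int) (N : Int) (out : Int) : Decidable (Spec_farey_rank p q N out) := by unfold Spec_farey_rank; infer_instance

-- ===== CLAIM (what is proved, stated in full; the proofs are below) =====
def Claim_equal_farey_rank : Prop := ∀ (p : Int) (q : Int) (N : Int), Dom_farey_rank p q N → Pre_farey_rank p q N → Spec_farey_rank p q N (farey_rank p q N)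

-- ===== LEMMAS AND PROOFS =====

-- the number of fractions n/d (any n in 1..d) below the threshold, as a Finset card
def pvAA (p : Int) (q : Int) (d : ℕ) : Int :=
  (((Finset.Icc 1 d).filter (fun n : ℕ => (n : Int) * q ≤ p * (d : Int))).card : Int)

-- the coprime count for denominator d (what the sieve isolates)
def pvG (p : Int) (q : Int) (d : ℕ) : Int :=
  (((Finset.Icc 1 d).filter (fun k : ℕ => Nat.gcd k d = 1 ∧ (k : Int) * q ≤ p * (d : Int))).card : Int)

-- counting helper
theorem pv_card_le (d m : ℕ) :
    ((Finset.Icc 1 d).filter (fun n => n ≤ m)).card = min d m := by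
  have h : (Finset.Icc 1 d).filter (fun n => n ≤ m) = Finset.Icc 1 (min d m) := by
    ext n; simp only [Finset.mem_filter, Finset.mem_Icc]; omega
  rw [h, Nat.card_Icc]; omega

theorem pv_closed_eq (p q : Int) (hq : 0 < q) (d : ℕ) (hd : 1 ≤ d) :
    pvClosedCount p q (d : Int) = pvAA p q d := by
  unfold pvClosedCount pvAA
  have hiff : ∀ n : ℕ, ((n:ℤ) * q ≤ p * (d:ℤ)) ↔ ((n:ℤ) ≤ PySem.Int.floordiv (p*(d:ℤ)) q) := by
    intro n
    rw [PySem.Int.le_floordiv_iff_mul_le hq]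
  simp only [hiff]
  set c := PySem.Int.floordiv (p*(d:ℤ)) q with hc
  by_cases h1 : c < 0
  · rw [Finset.filter_false_of_mem (fun n hn => by
      simp only [Finset.mem_Icc] at hn; omega)]
    simp only [Finset.card_empty]
    omega
  · have hiff2 : ∀ n : ℕ, ((n:ℤ) ≤ c) ↔ (n ≤ c.toNat) := by intro n; omega
    simp only [hiff2]
    rw [pv_card_le]
    push_cast
    omega

theorem pv_partition_nat (p q : Int) (d : ℕ) (hd : 1 ≤ d) :
    ((Finset.Icc 1 d).filter (fun n : ℕ => (n : Int) * q ≤ p * (d : Int))).card =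
      ∑ e ∈ d.divisors,
        ((Finset.Icc 1 e).filter (fun k : ℕ => Nat.gcd k e = 1 ∧ (k : Int) * q ≤ p * (e : Int))).card := by
  have hd0 : d ≠ 0 := by omega
  -- fiber each n by the divisor e = d / gcd n d
  rw [Finset.card_eq_sum_card_fiberwise (f := fun n => d / Nat.gcd n d)
    (t := d.divisors) (fun n _ => by
      exact Nat.mem_divisors.mpr ⟨⟨Nat.gcd n d, (Nat.div_mul_cancel (Nat.gcd_dvd_right n d)).symm⟩, hd0⟩)]
  refine Finset.sum_congr rfl (fun e he => ?_)
  obtain ⟨hed, -⟩ := Nat.mem_divisors.mp he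
  set g := d / e with hg
  have heg : e * g = d := Nat.mul_div_cancel' hed
  have he0 : 0 < e := by
    rcases Nat.eq_zero_or_pos e with h | h
    · exfalso; rw [h, Nat.zero_mul] at heg; omega
    · exact h
  have hg0 : 0 < g := by
    rcases Nat.eq_zero_or_pos g with h | h
    · exfalso; rw [h, Nat.mul_zero] at heg; omega
    · exact h
  have hgZ : (0:ℤ) < (g:ℤ) := by exact_mod_cast hg0
  -- on the fiber, gcd n d = g
  have key : ∀ n, n ∈ (Finset.Icc 1 d).filter (fun n : ℕ => (n : Int) * q ≤ p * (d : Int)) →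
      d / Nat.gcd n d = e → Nat.gcd n d = g := by
    intro n hn hf
    simp only [Finset.mem_filter, Finset.mem_Icc] at hn
    have hx : Nat.gcd n d ∣ d := Nat.gcd_dvd_right n d
    have hxe : e * Nat.gcd n d = d := by
      have := Nat.div_mul_cancel hx
      rw [hf] at this; omega
    have := heg
    exact Nat.eq_of_mul_eq_mul_left he0 (by omega)
  rw [Finset.filter_filter]
  apply Finset.card_nbij' (i := fun n => n / g) (j := fun k => k * g)
  · -- MapsTo i
    intro n hn
    simp only [Finset.coe_filter, Set.mem_setOf_eq, Finset.mem_Icc] at hn ⊢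
    obtain ⟨⟨hn1, hnd⟩, hP, hf⟩ := hn
    have hgcd : Nat.gcd n d = g := key n (by
      simp only [Finset.mem_filter, Finset.mem_Icc]; exact ⟨⟨hn1, hnd⟩, hP⟩) hf
    have hgn : g ∣ n := hgcd ▸ Nat.gcd_dvd_left n d
    have hkg : (n / g) * g = n := Nat.div_mul_cancel hgn
    have hgcdpos : 0 < Nat.gcd n d := Nat.gcd_pos_of_pos_right n (by omega)
    refine ⟨⟨?_, ?_⟩, ?_, ?_⟩
    · -- 1 ≤ n / g
      rcases Nat.eq_zero_or_pos (n / g) with h | h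
      · exfalso; rw [h, Nat.zero_mul] at hkg; omega
      · exact h
    · -- n / g ≤ e
      have : (n / g) * g ≤ e * g := by rw [hkg]; rw [heg]; exact hnd
      exact Nat.le_of_mul_le_mul_right this hg0
    · -- coprime
      have hc := Nat.coprime_div_gcd_div_gcd (m := n) (n := d) hgcdpos
      rw [hgcd] at hc
      have : d / g = e := by
        rw [← heg]; exact Nat.mul_div_cancel e hg0
      rw [this] at hc
      exact hc
    · -- threshold
      have hPc : ((n:ℤ)) * q ≤ p * ((d:ℤ)) := hP
      have hn' : ((n / g : ℕ):ℤ) * (g:ℤ) = (n:ℤ) := by exact_mod_cast congrArg (Nat.cast : ℕ → ℤ) hkg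
      have hd' : ((e:ℕ):ℤ) * (g:ℤ) = (d:ℤ) := by exact_mod_cast congrArg (Nat.cast : ℕ → ℤ) heg
      apply le_of_mul_le_mul_right ?_ hgZ
      calc ((n / g : ℕ):ℤ) * q * g = (((n / g : ℕ):ℤ) * g) * q := by ring
        _ = (n:ℤ) * q := by rw [hn']
        _ ≤ p * (d:ℤ) := hPc
        _ = p * ((e:ℤ) * g) := by rw [hd']
        _ = p * (e:ℤ) * g := by ring
  · -- MapsTo j
    intro k hk
    simp only [Finset.coe_filter, Set.mem_setOf_eq, Finset.mem_Icc] at hk ⊢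
    obtain ⟨⟨hk1, hke⟩, hcop, hPk⟩ := hk
    have hn1 : 1 ≤ k * g := Nat.one_le_iff_ne_zero.mpr (by positivity)
    have hnd : k * g ≤ d := by rw [← heg]; exact Nat.mul_le_mul_right g hke
    have hgcd : Nat.gcd (k * g) d = g := by
      rw [← heg, Nat.gcd_mul_right, hcop, Nat.one_mul]
    refine ⟨⟨hn1, hnd⟩, ?_, ?_⟩
    · -- threshold
      have hd' : ((e:ℕ):ℤ) * (g:ℤ) = (d:ℤ) := by exact_mod_cast congrArg (Nat.cast : ℕ → ℤ) heg
      have h2 : ((k:ℤ) * q) * g ≤ (p * (e:ℤ)) * g := mul_le_mul_of_nonneg_right hPk (le_of_lt hgZ)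
      calc ((k * g : ℕ):ℤ) * q = ((k:ℤ) * q) * g := by push_cast; ring
        _ ≤ (p * (e:ℤ)) * g := h2
        _ = p * ((e:ℤ) * g) := by ring
        _ = p * (d:ℤ) := by rw [hd']
    · -- fiber
      rw [hgcd, ← heg, Nat.mul_div_cancel e hg0]
  · -- left inverse
    intro n hn
    simp only [Finset.coe_filter, Set.mem_setOf_eq, Finset.mem_Icc] at hn
    obtain ⟨⟨hn1, hnd⟩, hP, hf⟩ := hn
    have hgcd : Nat.gcd n d = g := key n (by
      simp only [Finset.mem_filter, Finset.mem_Icc]; exact ⟨⟨hn1, hnd⟩, hP⟩) hf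
    have hgn : g ∣ n := hgcd ▸ Nat.gcd_dvd_left n d
    exact Nat.div_mul_cancel hgn
  · -- right inverse
    intro k _
    exact Nat.mul_div_cancel k hg0

theorem pv_partition (p q : Int) (d : ℕ) (hd : 1 ≤ d) :
    pvAA p q d = ∑ e ∈ d.divisors, pvG p q e := by
  unfold pvAA pvG
  exact_mod_cast pv_partition_nat p q d hd

-- A's inner loop, as a count
def pvInner (p q : Int) (d : Int) : Int :=
  (((PySem.List.pyRange 0 (d+1) 1).countP (fun n => decide (Int.gcd n d = 1 ∧ n * q ≤ p * d)) : ℕ) : ℤ)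

theorem pv_foldl_count (P : Int → Prop) [DecidablePred P] (l : List Int) (c0 : Int) :
    l.foldl (fun c n => if P n then c + 1 else c) c0
      = c0 + ((l.countP (fun n => decide (P n)) : ℕ) : ℤ) := by
  induction l generalizing c0 with
  | nil => simp
  | cons a t ih =>
    rw [List.foldl_cons, ih, List.countP_cons]
    by_cases h : P a <;> simp [h] <;> omega

theorem pv_foldl_sum (h : Int → Int) (l : List Int) (c0 : Int) :
    l.foldl (fun c d => c + h d) c0 = c0 + (l.map h).sum := by
  induction l generalizing c0 with
  | nil => simp
  | cons a t ih => rw [List.foldl_cons, ih, List.map_cons, List.sum_cons]; ring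

theorem pv_countP_range (m : ℕ) (pr : ℕ → Bool) :
    (List.range m).countP pr = ((Finset.range m).filter (fun n => pr n = true)).card := by
  induction m with
  | zero => simp
  | succ m ih =>
    rw [List.range_succ, List.countP_append, Finset.range_add_one, Finset.filter_insert]
    by_cases hpm : pr m = true
    · rw [if_pos hpm, Finset.card_insert_of_notMem (by
        intro hmem
        exact absurd (Finset.mem_of_mem_filter m hmem) (by simp)), ih]
      simp [hpm]
    · rw [if_neg hpm, ih]
      simp [hpm]

theorem pv_sum_range_nat (m : ℕ) (f : ℕ → Int) :
    ((List.range m).map f).sum = ∑ k ∈ Finset.range m, f k := by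
  induction m with
  | zero => simp
  | succ m ih => rw [List.range_succ, List.map_append, List.sum_append, Finset.sum_range_succ, ih]; simp

theorem pv_inner_eq (p q : Int) (j : ℕ) (hj : 1 ≤ j) :
    pvInner p q (j : ℤ) = pvG p q j + (if j = 1 ∧ 0 ≤ p then 1 else 0) := by
  unfold pvInner pvG
  rw [PySem.List.pyRange_one]
  have ht : ((j : ℤ) + 1 - 0).toNat = j + 1 := by omega
  rw [ht, List.countP_map]
  rw [pv_countP_range]
  have hins : Finset.range (j+1) = insert 0 (Finset.Icc 1 j) := by
    ext n; simp only [Finset.mem_range, Finset.mem_insert, Finset.mem_Icc]; omega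
  rw [hins, Finset.filter_insert]
  have h0 : (((fun n => decide (Int.gcd n (j:ℤ) = 1 ∧ n * q ≤ p * (j:ℤ))) ∘ fun k : ℕ => 0 + (k:ℤ)) 0 = true)
      ↔ (j = 1 ∧ 0 ≤ p) := by
    simp only [Function.comp_apply]
    push_cast
    simp only [decide_eq_true_eq]
    constructor
    · rintro ⟨hg, hle⟩
      have hj1 : j = 1 := by
        have : Int.gcd 0 (j:ℤ) = j := by simp [Int.gcd]
        omega
      refine ⟨hj1, ?_⟩
      subst hj1
      simpa using hle
    · rintro ⟨hj1, hp⟩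
      subst hj1
      constructor
      · simp [Int.gcd]
      · simpa using hp
  have hfilter :
      (Finset.Icc 1 j).filter (fun n => ((fun n => decide (Int.gcd n (j:ℤ) = 1 ∧ n * q ≤ p * (j:ℤ))) ∘ fun k : ℕ => 0 + (k:ℤ)) n = true)
        = (Finset.Icc 1 j).filter (fun k : ℕ => Nat.gcd k j = 1 ∧ (k : Int) * q ≤ p * (j : Int)) := by
    apply Finset.filter_congr
    intro n _
    simp only [Function.comp_apply, decide_eq_true_eq, zero_add]
    constructor
    · rintro ⟨hg, hle⟩
      refine ⟨?_, hle⟩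
      simpa [Int.gcd] using hg
    · rintro ⟨hg, hle⟩
      refine ⟨?_, hle⟩
      simpa [Int.gcd] using hg
  by_cases hc : j = 1 ∧ 0 ≤ p
  · rw [if_pos (h0.mpr hc)]
    rw [Finset.card_insert_of_notMem (by
      intro hmem
      have := Finset.mem_of_mem_filter 0 hmem
      simp [Finset.mem_Icc] at this)]
    rw [hfilter, if_pos hc]
    push_cast; ring
  · rw [if_neg (fun h => hc (h0.mp h)), hfilter, if_neg hc]
    push_cast; ring

theorem pv_A_sum (p q N : Int) (hN : ¬ q > N) :
    farey_rank p q N =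
      (if 0 ≤ p ∧ 1 ≤ N then 1 else 0) + ∑ d ∈ Finset.Icc 1 N.toNat, pvG p q d := by
  unfold farey_rank
  rw [if_neg hN]
  have hbody : (fun (c d : Int) => (PySem.List.pyRange 0 (d+1) 1).foldl
        (fun c n => if Int.gcd n d = 1 ∧ n * q ≤ p * d then c + 1 else c) c)
      = (fun (c d : Int) => c + pvInner p q d) := by
    funext c d
    exact pv_foldl_count (fun n => Int.gcd n d = 1 ∧ n * q ≤ p * d) _ c
  rw [hbody, pv_foldl_sum, PySem.List.pyRange_one, List.map_map]
  by_cases hN1 : 1 ≤ N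
  · have hM : ((N:ℤ) + 1 - 1).toNat = N.toNat := by omega
    rw [hM]
    have hmap : ∀ k : ℕ, ((fun d => pvInner p q d) ∘ fun k : ℕ => 1 + (k:ℤ)) k
        = pvG p q (k+1) + (if k + 1 = 1 ∧ 0 ≤ p then 1 else 0) := by
      intro k
      have : (1 + (k:ℤ)) = ((k+1 : ℕ) : ℤ) := by push_cast; ring
      simp only [Function.comp_apply, this]
      exact pv_inner_eq p q (k+1) (by omega)
    rw [List.map_congr_left (fun k _ => hmap k), ]
    have hsplit : ((List.range N.toNat).map
        (fun k => pvG p q (k+1) + (if k + 1 = 1 ∧ 0 ≤ p then 1 else 0))).sum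
        = (∑ k ∈ Finset.range N.toNat, pvG p q (k+1))
          + ∑ k ∈ Finset.range N.toNat, (if k + 1 = 1 ∧ 0 ≤ p then 1 else 0) := by
      rw [pv_sum_range_nat, Finset.sum_add_distrib]
    rw [hsplit]
    have hIcc : ∑ k ∈ Finset.range N.toNat, pvG p q (k+1) = ∑ d ∈ Finset.Icc 1 N.toNat, pvG p q d := by
      rw [← Finset.Ico_add_one_right_eq_Icc, Finset.sum_Ico_eq_sum_range]
      apply Finset.sum_congr (by congr 1)
      intro k _
      congr 1
      omega
    have hone : (∑ k ∈ Finset.range N.toNat, ((if k + 1 = 1 ∧ 0 ≤ p then 1 else 0) : ℤ))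
        = (if 0 ≤ p ∧ 1 ≤ N then 1 else 0) := by
      by_cases hp : 0 ≤ p
      · have : ∀ k : ℕ, ((if k + 1 = 1 ∧ 0 ≤ p then 1 else 0) : ℤ) = (if k = 0 then 1 else 0) := by
          intro k; by_cases hk : k = 0 <;> simp [hk, hp] <;> omega
        simp only [this]
        rw [Finset.sum_ite_eq' (Finset.range N.toNat) 0 (fun _ => (1:ℤ))]
        rw [if_pos (by simp; omega), if_pos ⟨hp, hN1⟩]
      · simp [hp]
    rw [hIcc, hone]
    ring
  · have hM : ((N:ℤ) + 1 - 1).toNat = 0 := by omega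
    have h0 : N.toNat = 0 := by omega
    rw [hM, h0]
    simp [hN1]

-- getD/set helpers
theorem pv_getD_set_ne (l : List Int) (i j : ℕ) (v : Int) (h : i ≠ j) :
    (l.set i v).getD j 0 = l.getD j 0 := by
  rw [List.getD_eq_getElem?_getD, List.getD_eq_getElem?_getD, List.getElem?_set, if_neg h]

theorem pv_getD_set_eq (l : List Int) (i : ℕ) (v : Int) (h : i < l.length) :
    (l.set i v).getD i 0 = v := by
  rw [List.getD_eq_getElem?_getD, List.getElem?_set]
  simp [h]

-- the initialising loop of B, pointwise
theorem pv_setloop (f : ℕ → Int) (M : ℕ) (l0 : List Int) :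
    (((List.range' 1 M).foldl (fun a d => a.set d (f d)) l0).length = l0.length) ∧
    (∀ i, ((List.range' 1 M).foldl (fun a d => a.set d (f d)) l0).getD i 0
        = if 1 ≤ i ∧ i ≤ M ∧ i < l0.length then f i else l0.getD i 0) := by
  induction M with
  | zero =>
    refine ⟨by simp, fun i => ?_⟩
    rw [if_neg (by omega)]
    simp
  | succ M ih =>
    rw [List.range'_concat]
    simp only [List.foldl_append, List.foldl_cons, List.foldl_nil]
    obtain ⟨ihlen, ihval⟩ := ih
    constructor
    · rw [List.length_set, ihlen]
    · intro i
      by_cases hij : 1 + 1 * M = i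
      · subst hij
        by_cases hlt : 1 + 1 * M < l0.length
        · rw [pv_getD_set_eq _ _ _ (by rw [ihlen]; exact hlt)]
          rw [if_pos ⟨by omega, by omega, hlt⟩]
        · rw [List.set_eq_of_length_le (by rw [ihlen]; omega)]
          rw [ihval, if_neg (by omega), if_neg (by omega)]
      · rw [pv_getD_set_ne _ _ _ _ hij, ihval]
        by_cases hi : 1 ≤ i ∧ i ≤ M ∧ i < l0.length
        · rw [if_pos hi, if_pos ⟨hi.1, by omega, hi.2.2⟩]
        · rw [if_neg hi, if_neg (by omega)]

-- the inner sieve loop of B, pointwise (positions are multiples of d beyond d)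
theorem pv_sieveinner (d : ℕ) (hd : 1 ≤ d) (j : ℕ) (a : List Int) :
    (((List.range' (2*d) j d).foldl (fun a m => a.set m (a.getD m 0 - a.getD d 0)) a).length = a.length) ∧
    (∀ i, ((List.range' (2*d) j d).foldl (fun a m => a.set m (a.getD m 0 - a.getD d 0)) a).getD i 0
        = a.getD i 0 - (if i ∈ List.range' (2*d) j d ∧ i < a.length then a.getD d 0 else 0)) := by
  induction j with
  | zero => simp
  | succ j ih =>
    rw [List.range'_concat]
    simp only [List.foldl_append, List.foldl_cons, List.foldl_nil]
    obtain ⟨ihlen, ihval⟩ := ih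
    have hmem_d : ¬ (d ∈ List.range' (2*d) j d) := by
      rw [List.mem_range']
      rintro ⟨t, ht, heq⟩
      omega
    have hmem_mj : ¬ ((2*d + d*j) ∈ List.range' (2*d) j d) := by
      rw [List.mem_range']
      rintro ⟨t, ht, heq⟩
      have : d * t < d * j := by
        have h := (Nat.mul_lt_mul_left (show 0 < d by omega)).mpr ht
        omega
      omega
    have hrd : ((List.range' (2*d) j d).foldl (fun a m => a.set m (a.getD m 0 - a.getD d 0)) a).getD d 0
        = a.getD d 0 := by
      rw [ihval, if_neg (by tauto)]
      ring
    have hmem_succ : ∀ i, i ∈ List.range' (2*d) j d ++ [2*d + d*j] ↔ (i ∈ List.range' (2*d) j d ∨ i = 2*d + d*j) := by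
      intro i
      rw [List.mem_append]
      simp
    constructor
    · rw [List.length_set, ihlen]
    · intro i
      by_cases hij : 2*d + d*j = i
      · subst hij
        by_cases hlt : 2*d + d*j < a.length
        · rw [pv_getD_set_eq _ _ _ (by rw [ihlen]; exact hlt), hrd]
          rw [ihval, if_neg (by tauto)]
          rw [if_pos ⟨(hmem_succ _).mpr (Or.inr rfl), hlt⟩]
          ring
        · rw [List.set_eq_of_length_le (by rw [ihlen]; omega)]
          rw [ihval, if_neg (by tauto), if_neg (by omega)]
      · rw [pv_getD_set_ne _ _ _ _ hij, ihval]
        by_cases hi : i ∈ List.range' (2*d) j d ∧ i < a.length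
        · rw [if_pos hi, if_pos ⟨(hmem_succ _).mpr (Or.inl hi.1), hi.2⟩]
        · rw [if_neg hi]
          rw [if_neg (by
            rintro ⟨hmem, hlen⟩
            rcases (hmem_succ i).mp hmem with h | h
            · exact hi ⟨h, hlen⟩
            · exact hij h.symm)]

-- membership in B's multiples list
theorem pv_mem_mult (d M i : ℕ) (hd : 1 ≤ d) (hdM : d ≤ M) :
    i ∈ List.range' (2*d) (M / d - 1) d ↔ (d ∣ i ∧ 2*d ≤ i ∧ i ≤ M) := by
  rw [List.mem_range']
  constructor
  · rintro ⟨t, ht, rfl⟩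
    refine ⟨⟨t+2, by ring⟩, by omega, ?_⟩
    have h1 : t + 2 ≤ M / d := by
      have hMd : 1 ≤ M / d := (Nat.le_div_iff_mul_le (by omega)).mpr (by omega)
      omega
    have h2 : (t + 2) * d ≤ M := (Nat.le_div_iff_mul_le (by omega)).mp h1
    calc 2*d + d*t = (t+2)*d := by ring
      _ ≤ M := h2
  · rintro ⟨⟨c, rfl⟩, h2, h3⟩
    have hc2 : 2 ≤ c := by
      have : d * 2 ≤ d * c := by omega
      exact Nat.le_of_mul_le_mul_left this (by omega)
    obtain ⟨t, rfl⟩ : ∃ t, c = t + 2 := ⟨c - 2, by omega⟩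
    refine ⟨t, ?_, by ring⟩
    have hcM : t + 2 ≤ M / d := (Nat.le_div_iff_mul_le (by omega)).mpr (by
      calc (t+2) * d = d * (t+2) := by ring
        _ ≤ M := h3)
    omega

-- the partial divisor sum maintained by the sieve
def pvS (p q : Int) (k m : ℕ) : Int := ∑ e ∈ m.properDivisors.filter (· ≤ k), pvG p q e

theorem pvS_zero (p q : Int) (m : ℕ) : pvS p q 0 m = 0 := by
  unfold pvS
  rw [Finset.filter_false_of_mem, Finset.sum_empty]
  intro e he hle
  simp only [Nat.mem_properDivisors] at he
  have he0 : e = 0 := by omega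
  subst he0
  have := Nat.eq_zero_of_zero_dvd he.1
  omega

theorem pvS_succ (p q : Int) (k m : ℕ) :
    pvS p q (k+1) m = pvS p q k m + (if (k+1) ∈ m.properDivisors then pvG p q (k+1) else 0) := by
  unfold pvS
  by_cases h : (k+1) ∈ m.properDivisors
  · rw [if_pos h]
    have hset : m.properDivisors.filter (· ≤ k+1) = insert (k+1) (m.properDivisors.filter (· ≤ k)) := by
      ext e
      simp only [Finset.mem_filter, Finset.mem_insert, decide_eq_true_eq]
      constructor
      · rintro ⟨he, hle⟩
        by_cases heq : e = k+1
        · exact Or.inl heq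
        · exact Or.inr ⟨he, by omega⟩
      · rintro (rfl | ⟨he, hle⟩)
        · exact ⟨h, by omega⟩
        · exact ⟨he, by omega⟩
    rw [hset, Finset.sum_insert (by
      intro hmem
      simp only [Finset.mem_filter, decide_eq_true_eq] at hmem
      omega)]
    ring
  · rw [if_neg h, add_zero]
    apply Finset.sum_congr _ (fun _ _ => rfl)
    ext e
    simp only [Finset.mem_filter, decide_eq_true_eq]
    constructor
    · rintro ⟨he, hle⟩
      refine ⟨he, ?_⟩
      by_cases heq : e = k+1
      · exact absurd (heq ▸ he) h
      · omega
    · rintro ⟨he, hle⟩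
      exact ⟨he, by omega⟩

theorem pvS_full (p q : Int) (k m : ℕ) (h : m ≤ k+1) :
    pvS p q k m = ∑ e ∈ m.properDivisors, pvG p q e := by
  unfold pvS
  apply Finset.sum_congr _ (fun _ _ => rfl)
  apply Finset.filter_true_of_mem
  intro e he
  simp only [Nat.mem_properDivisors] at he
  omega

theorem pv_G_rec (p q : Int) (m : ℕ) (hm : 1 ≤ m) :
    pvG p q m = pvAA p q m - ∑ e ∈ m.properDivisors, pvG p q e := by
  have h := pv_partition p q m hm
  rw [← Nat.insert_self_properDivisors (by omega),
    Finset.sum_insert Nat.self_notMem_properDivisors] at h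
  linarith

-- the outer sieve loop: invariant (indices 1..M carry the sieved values; index 0 is untouched)
theorem pv_sieve_invariant (p q : Int) (M : ℕ) (cnt1 : List Int)
    (hlen : cnt1.length = M+1) (hval : ∀ m, 1 ≤ m → m ≤ M → cnt1.getD m 0 = pvAA p q m) :
    ∀ k, k ≤ M →
      (((List.range' 1 k).foldl (fun (a : List Int) d =>
          (List.range' (2*d) (M / d - 1) d).foldl
            (fun (a : List Int) m => a.set m (a.getD m 0 - a.getD d 0)) a) cnt1).length = M+1)
      ∧ (((List.range' 1 k).foldl (fun (a : List Int) d =>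
          (List.range' (2*d) (M / d - 1) d).foldl
            (fun (a : List Int) m => a.set m (a.getD m 0 - a.getD d 0)) a) cnt1).getD 0 0 = cnt1.getD 0 0)
      ∧ (∀ m, 1 ≤ m → m ≤ M →
          ((List.range' 1 k).foldl (fun (a : List Int) d =>
            (List.range' (2*d) (M / d - 1) d).foldl
              (fun (a : List Int) m => a.set m (a.getD m 0 - a.getD d 0)) a) cnt1).getD m 0
          = pvAA p q m - pvS p q k m) := by
  intro k
  induction k with
  | zero =>
    intro _
    simp only [List.range'_zero, List.foldl_nil]
    refine ⟨hlen, trivial, fun m h1 h2 => ?_⟩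
    rw [hval m h1 h2, pvS_zero]
    ring
  | succ k ih =>
    intro hk
    obtain ⟨ihlen, ihzero, ihval⟩ := ih (by omega)
    set r := (List.range' 1 k).foldl (fun (a : List Int) d =>
        (List.range' (2*d) (M / d - 1) d).foldl
          (fun (a : List Int) m => a.set m (a.getD m 0 - a.getD d 0)) a) cnt1 with hr
    rw [List.range'_concat]
    simp only [List.foldl_append, List.foldl_cons, List.foldl_nil, ← hr]
    set d := 1 + 1 * k with hd
    have hd1 : 1 ≤ d := by omega
    have hdM : d ≤ M := by omega
    obtain ⟨slen, sval⟩ := pv_sieveinner d hd1 (M / d - 1) r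
    have hrd : r.getD d 0 = pvG p q d := by
      rw [ihval d (by omega) hdM, pvS_full p q k d (by omega), ← pv_G_rec p q d hd1]
    have hzero_mem : ¬ (0 ∈ List.range' (2*d) (M / d - 1) d ∧ 0 < r.length) := by
      rintro ⟨hmem, -⟩
      rw [List.mem_range'] at hmem
      obtain ⟨t, -, heq⟩ := hmem
      omega
    refine ⟨by rw [slen, ihlen], ?_, fun m h1 h2 => ?_⟩
    · rw [sval 0, if_neg hzero_mem, ihzero]; ring
    · rw [sval m, hrd, ihval m h1 h2]
      have hcond : (m ∈ List.range' (2*d) (M / d - 1) d ∧ m < r.length) ↔ d ∈ m.properDivisors := by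
        rw [pv_mem_mult d M m hd1 hdM, Nat.mem_properDivisors, ihlen]
        constructor
        · rintro ⟨⟨hdvd, h2d, hmM⟩, _⟩
          exact ⟨hdvd, by omega⟩
        · rintro ⟨hdvd, hlt⟩
          obtain ⟨c, rfl⟩ := hdvd
          have hc2 : 2 ≤ c := by
            rcases Nat.lt_or_ge c 2 with h | h
            · interval_cases c <;> omega
            · exact h
          have h2d : d * 2 ≤ d * c := Nat.mul_le_mul_left d hc2
          exact ⟨⟨⟨c, rfl⟩, by omega, by omega⟩, by omega⟩
      have hSsucc := pvS_succ p q k m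
      rw [show d = k + 1 by omega] at hcond hrd ⊢
      by_cases hmem : (k+1) ∈ m.properDivisors
      · rw [if_pos (hcond.mpr hmem)]
        rw [hSsucc, if_pos hmem]
        ring
      · rw [if_neg (fun h => hmem (hcond.mp h))]
        rw [hSsucc, if_neg hmem]
        ring

theorem pv_sum_range'_Icc (m : ℕ) (f : ℕ → Int) :
    ((List.range' 1 m).map f).sum = ∑ j ∈ Finset.Icc 1 m, f j := by
  induction m with
  | zero => simp
  | succ m ih =>
    rw [List.range'_concat, List.map_append, List.sum_append, ih,
      Finset.sum_Icc_succ_top (by omega)]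
    simp only [List.map_cons, List.map_nil, List.sum_cons, List.sum_nil, add_zero, one_mul]
    rw [Nat.add_comm 1 m]

theorem pv_sum_head (l : List Int) (h : l ≠ []) :
    l.sum = l.getD 0 0 + (l.drop 1).sum := by
  cases l with
  | nil => exact absurd rfl h
  | cons a t => simp

theorem pv_B_sum (p q N : Int) (hq : 0 < q) (hN : ¬ q > N) :
    farey_rank_alt p q N =
      (if 0 ≤ p then 1 else 0) + ∑ d ∈ Finset.Icc 1 N.toNat, pvG p q d := by
  unfold farey_rank_alt
  rw [if_neg hN]
  set M := N.toNat with hM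
  have hM1 : 1 ≤ M := by omega
  have hlen0 : ((N:ℤ)+1).toNat = M + 1 := by omega
  -- first loop
  obtain ⟨len1, val1⟩ := pv_setloop (fun d => pvClosedCount p q (d : Int)) M (List.replicate (M+1) (0:Int))
  rw [hlen0]
  set cnt1 := (List.range' 1 M).foldl
      (fun (a : List Int) d => a.set d (pvClosedCount p q (d : Int))) (List.replicate (M+1) (0:Int)) with hcnt1
  have hlen1 : cnt1.length = M + 1 := by rw [len1, List.length_replicate]
  have hval1 : ∀ m, 1 ≤ m → m ≤ M → cnt1.getD m 0 = pvAA p q m := by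
    intro m h1 h2
    rw [val1 m, if_pos ⟨h1, h2, by rw [List.length_replicate]; omega⟩]
    exact pv_closed_eq p q hq m h1
  have hzero1 : cnt1.getD 0 0 = 0 := by
    rw [val1 0, if_neg (by omega)]
    simp
  -- sieve loop
  obtain ⟨len2, zero2, val2⟩ := pv_sieve_invariant p q M cnt1 hlen1 hval1 M (le_refl M)
  set r := (List.range' 1 M).foldl (fun (a : List Int) d =>
      (List.range' (2*d) (M / d - 1) d).foldl
        (fun (a : List Int) m => a.set m (a.getD m 0 - a.getD d 0)) a) cnt1 with hrdef
  have hvalr : ∀ m, 1 ≤ m → m ≤ M → r.getD m 0 = pvG p q m := by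
    intro m h1 h2
    rw [val2 m h1 h2, pvS_full p q M m (by omega), ← pv_G_rec p q m h1]
  -- the tail of the final list is exactly the coprime counts, its head is 0
  have hdrop : r.drop 1 = (List.range' 1 M).map (fun m => pvG p q m) := by
    apply List.ext_getElem
    · rw [List.length_drop, len2, List.length_map, List.length_range']
      omega
    · intro i hi1 hi2
      rw [List.getElem_drop]
      rw [List.getElem_map, List.getElem_range']
      have hiM : i < M := by simpa [List.length_map, List.length_range'] using hi2
      have : r[1+i]'(by rw [len2]; omega) = r.getD (1+i) 0 := by
        rw [List.getD_eq_getElem _ _ (by rw [len2]; omega)]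
      rw [this, hvalr (1+i) (by omega) (by omega)]
      simp
  have hsum : r.sum = ∑ d ∈ Finset.Icc 1 M, pvG p q d := by
    rw [pv_sum_head r (by intro h; rw [h] at len2; simp at len2),
      zero2, hzero1, hdrop, pv_sum_range'_Icc]
    ring
  simp only [ge_iff_le]
  rw [← hcnt1, ← hrdef, hsum]

-- ===== VERDICT (by name: the statement is the Claim_ definition above) =====
theorem farey_rank_spec : Claim_equal_farey_rank := by
  intro p q N _ hpre
  unfold Spec_farey_rank
  by_cases hqN : q > N
  · simp [farey_rank, farey_rank_alt, hqN]
  · have hq : 0 < q := by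
      unfold Pre_farey_rank at hpre
      rcases hpre with h | h
      · omega
      · omega
    have hN1 : 1 ≤ N := by omega
    rw [pv_A_sum p q N hqN, pv_B_sum p q N hq hqN]
    simp [hN1]
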